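-- pv_equiv track=rewrite | github.com/Ko-udon/Algorithm | 프로그래머스/unrated/250125. ［PCCE 기출문제］ 9번 ／ 이웃한 칸/［PCCE 기출문제］ 9번 ／ 이웃한 칸.py | solution
-- ===== SOURCE A (Python) =====
-- def solution(board, h, w):
--     answer = 0
--     color = board[h][w]
--
--     li = checkCount(h,w,len(board))
--
--     for l in li:
--         if color == board[l[0]][l[1]]:
--             answer +=1
--
--     return answer
--
-- def checkCount(h,w,size):
--     checkList = []
--
--     if h-1 > -1:
--         checkList.append([h-1,w])
--
--     if (w-1>-1):
--         checkList.append([h,w-1])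
--
--     if (w+1<size):
--         checkList.append([h,w+1])
--
--     if (h+1<size):
--         checkList.append([h+1,w])
--
--
--     return checkList
-- ===== SOURCE B (Python) =====
-- def _line(cells, k, n, color):
--     # neighbors of position k along one line of an n-sized square board
--     count = 0
--     if k - 1 > -1 and cells[k - 1] == color:
--         count += 1
--     if k + 1 < n and cells[k + 1] == color:
--         count += 1
--     return count
--
-- def solution(board, h, w):
--     # Symmetry reduction: the four neighbor checks are one 1-D check applied
--     # to the cell's row and (after materializing it) to the cell's column.
--     n = len(board)
--     column = [row[w] for row in board]
--     color = column[h]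
--     return _line(board[h], w, n, color) + _line(column, h, n, color)
-- ===== Notes on version B (the rewrite author's own statement) =====
-- stated objective: alternative
-- what changed: Drops A's checkCount neighbor-coordinate-list-then-count decomposition for a symmetry reduction: B materializes the cell's column as a list and applies one 1-D line-neighbor counter twice, once to the row and once to the column.
-- outside the precondition, e.g. on solution([['b'], ['b', 'b', 'b'], ['b', 'a', 'b']], 2, 1): A returns 0, B raises IndexError
import Mathlib
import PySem

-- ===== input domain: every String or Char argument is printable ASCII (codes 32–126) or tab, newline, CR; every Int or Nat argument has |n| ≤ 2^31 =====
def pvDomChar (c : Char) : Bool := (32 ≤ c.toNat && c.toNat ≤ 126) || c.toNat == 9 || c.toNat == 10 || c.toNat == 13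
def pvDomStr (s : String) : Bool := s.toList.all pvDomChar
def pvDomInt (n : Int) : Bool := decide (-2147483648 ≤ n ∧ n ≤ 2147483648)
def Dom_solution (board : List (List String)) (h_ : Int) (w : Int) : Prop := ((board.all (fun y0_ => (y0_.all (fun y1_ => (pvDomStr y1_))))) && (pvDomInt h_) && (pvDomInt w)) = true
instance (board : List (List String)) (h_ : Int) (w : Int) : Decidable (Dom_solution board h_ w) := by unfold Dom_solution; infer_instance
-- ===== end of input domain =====

-- B replaces A's build-a-neighbor-coordinate-list-then-count decomposition by a symmetry
-- reduction: it materializes the cell's column as a list and applies one 1-D line-neighbor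
-- counter twice, to the row and to the column (return value only; neither side mutates).

-- shared Python-indexing accessors (total with a default; on Pre_ every use is in range)
def pvRowAt (board : List (List String)) (i : Int) : List String :=
  (PySem.List.pyGet? board i).getD []

def pvGetS (cells : List String) (i : Int) : String :=
  (PySem.List.pyGet? cells i).getD ""

def pvCell (board : List (List String)) (i j : Int) : String :=
  pvGetS (pvRowAt board i) j

-- ===== PORT A =====
def checkCount (h w size : Int) : List (Int × Int) :=
  (if h - 1 > -1 then [(h - 1, w)] else []) ++
  (if w - 1 > -1 then [(h, w - 1)] else []) ++
  (if w + 1 < size then [(h, w + 1)] else []) ++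
  (if h + 1 < size then [(h + 1, w)] else [])

def solution (board : List (List String)) (h_ : Int) (w : Int) : Int :=
  let color := pvCell board h_ w
  let li := checkCount h_ w (board.length : Int)
  li.foldl (fun answer l => if color = pvCell board l.1 l.2 then answer + 1 else answer) 0

-- ===== PORT B =====
def lineNbrs (cells : List String) (k n : Int) (color : String) : Int :=
  let count : Int := 0
  let count := if k - 1 > -1 ∧ pvGetS cells (k - 1) = color then count + 1 else count
  let count := if k + 1 < n ∧ pvGetS cells (k + 1) = color then count + 1 else count
  count

def solution_alt (board : List (List String)) (h_ : Int) (w : Int) : Int :=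
  let n : Int := (board.length : Int)
  let column := board.map (fun row => pvGetS row w)
  let color := pvGetS column h_
  lineNbrs (pvRowAt board h_) w n color + lineNbrs column h_ n color

-- ===== PRECONDITION & SPEC =====
-- Pre_ = the inputs on which neither Python raises an IndexError: h in range of the board,
-- the column index w in range of EVERY row (B materializes the whole column, so it raises
-- on ragged boards whose other rows lack index w although A, which only probes the rows
-- next to h, still returns there — those inputs are excluded because B itself raises),
-- and the two row-neighbor accesses both programs perform in range.
def Pre_solution (board : List (List String)) (h_ : Int) (w : Int) : Prop :=
  PySem.Raise.InRange board.length h_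
  ∧ (∀ row ∈ board, PySem.Raise.InRange row.length w)
  ∧ (w - 1 > -1 → PySem.Raise.InRange (pvRowAt board h_).length (w - 1))
  ∧ (w + 1 < (board.length : Int) → PySem.Raise.InRange (pvRowAt board h_).length (w + 1))
instance (board : List (List String)) (h_ : Int) (w : Int) : Decidable (Pre_solution board h_ w) := by unfold Pre_solution; infer_instance

def pvWitness_solution : List (List String) × Int × Int := ([["a", "b"], ["a", "a"]], 1, 0)

def Spec_solution (board : List (List String)) (h_ : Int) (w : Int) (out : Int) : Prop := out = solution_alt board h_ w
instance (board : List (List String)) (h_ : Int) (w : Int) (out : Int) : Decidable (Spec_solution board h_ w out) := by unfold Spec_solution; infer_instance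

-- ===== CLAIM (what is proved, stated in full; the proofs are below) =====
def Claim_equal_solution : Prop := ∀ (board : List (List String)) (h_ : Int) (w : Int), Dom_solution board h_ w → Pre_solution board h_ w → Spec_solution board h_ w (solution board h_ w)

-- ===== LEMMAS AND PROOFS =====

-- Python indexing commutes with map (both ports are exact Python indexing, so this is by unfolding)
theorem pyGet?_map_pv {α β : Type} (f : α → β) (xs : List α) (i : Int) :
    PySem.List.pyGet? (xs.map f) i = (PySem.List.pyGet? xs i).map f := by
  simp [PySem.List.pyGet?, PySem.List.pyIdx?]

-- reading B's materialized column at any Python index is reading the board cell (i, w)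
theorem pvGetS_column (board : List (List String)) (w i : Int) :
    pvGetS (board.map (fun row => pvGetS row w)) i = pvCell board i w := by
  simp only [pvGetS, pvCell, pvRowAt, pyGet?_map_pv]
  cases hx : PySem.List.pyGet? board i
  · simp [PySem.List.pyGet?, PySem.List.pyIdx?]
  · rfl

-- ===== VERDICT (by name: the statement is the Claim_ definition above) =====
set_option maxHeartbeats 1600000 in
theorem solution_spec : Claim_equal_solution := by
  intro board h_ w _ _
  show solution board h_ w = solution_alt board h_ w
  simp only [solution, solution_alt, lineNbrs, checkCount, pvGetS_column]
  have e1 : ∀ j, pvGetS (pvRowAt board h_) j = pvCell board h_ j := fun _ => rfl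
  simp only [e1]
  by_cases b1 : (-1:Int) < h_ - 1 <;> by_cases b2 : (-1:Int) < w - 1 <;>
    by_cases b3 : w + 1 < (board.length : Int) <;> by_cases b4 : h_ + 1 < (board.length : Int) <;>
    simp only [b1, b2, b3, b4, if_true, if_false, true_and, false_and,
      List.cons_append, List.nil_append, List.append_nil, List.foldl_cons, List.foldl_nil,
      eq_comm] <;>
    first
      | omega
      | (split_ifs <;> omega)
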